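-- pv_equiv track=rewrite | github.com/Bsoong/CS-115 | mergeb.py | num_matches
-- ===== SOURCE A (Python) =====
-- def num_matches(list1, list2):
--     '''returns the number of elements that the two lists have in common'''
--     list1.sort()
--     list2.sort()
--     end_line = []
--     matches = i = j = 0
--     while i < len(list1) and j < len(list2):
--         if list1[i] == list2[j]:
--             matches +=1
--             i +=1
--             j+=1
--         elif list1[i] < list2[j]:
--             i+=1
--         else:
--             j+=1
--     return matches
-- ===== SOURCE B (Python) =====
-- def num_matches(list1, list2):
--     '''returns the number of elements that the two lists have in common'''
--     # keeps A's in-place sorts so the observable argument mutation is identical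
--     list1.sort()
--     list2.sort()
--     c1 = {}
--     for v in list1:
--         c1[v] = c1.get(v, 0) + 1
--     c2 = {}
--     for v in list2:
--         c2[v] = c2.get(v, 0) + 1
--     return sum(min(n, c2.get(v, 0)) for v, n in c1.items())
-- ===== Notes on version B (the rewrite author's own statement) =====
-- stated objective: alternative
-- what changed: Replaces the two-pointer interleaved merge walk with frequency tables: one counting dict per list built in a single pass, then a sum of min(count1, count2) over the first dict's entries; the in-place sorts are kept so the argument mutation matches A.
import Mathlib
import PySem

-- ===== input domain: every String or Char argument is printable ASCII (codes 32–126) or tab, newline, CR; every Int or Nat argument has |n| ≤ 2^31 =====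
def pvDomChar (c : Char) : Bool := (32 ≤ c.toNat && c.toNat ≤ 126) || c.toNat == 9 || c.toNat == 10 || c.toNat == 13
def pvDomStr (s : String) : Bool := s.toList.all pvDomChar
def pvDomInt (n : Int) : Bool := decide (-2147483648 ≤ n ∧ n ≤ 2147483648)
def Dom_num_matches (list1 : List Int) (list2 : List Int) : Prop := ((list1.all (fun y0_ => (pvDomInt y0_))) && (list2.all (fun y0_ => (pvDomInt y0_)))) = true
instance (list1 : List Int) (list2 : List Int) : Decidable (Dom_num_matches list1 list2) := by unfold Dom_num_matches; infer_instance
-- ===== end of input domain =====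

-- B replaces A's two-pointer merge walk with a value-frequency intersection (sum of min counts
-- over distinct values); both versions sort the arguments in place, so the mutation is identical.


-- ===== PORT A =====
-- the while loop of A: indices i, j into the two (already sorted) lists, accumulator `matches`
def pvALoop (l1 l2 : List Int) (i j : Nat) (acc : Int) : Int :=
  if h : i < l1.length ∧ j < l2.length then
    if l1[i]'h.1 = l2[j]'h.2 then pvALoop l1 l2 (i+1) (j+1) (acc+1)
    else if l1[i]'h.1 < l2[j]'h.2 then pvALoop l1 l2 (i+1) j acc
    else pvALoop l1 l2 i (j+1) acc
  else acc
termination_by (l1.length - i) + (l2.length - j)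
decreasing_by all_goals omega

def num_matches (list1 : List Int) (list2 : List Int) : Int :=
  let l1 := PySem.List.sorted list1 (fun x => x) false   -- list1.sort()
  let l2 := PySem.List.sorted list2 (fun x => x) false   -- list2.sort()
  pvALoop l1 l2 0 0 0

-- ===== PORT B =====
def num_matches_alt (list1 : List Int) (list2 : List Int) : Int :=
  let l1 := PySem.List.sorted list1 (fun x => x) false   -- list1.sort()
  let l2 := PySem.List.sorted list2 (fun x => x) false   -- list2.sort()
  -- c1 = {}; for v in l1: c1[v] = c1.get(v, 0) + 1   (same for c2)
  let c1 := l1.foldl (fun (d : PySem.Dict Int Int) v => d.insert v (d.getD v 0 + 1)) PySem.Dict.empty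
  let c2 := l2.foldl (fun (d : PySem.Dict Int Int) v => d.insert v (d.getD v 0 + 1)) PySem.Dict.empty
  -- sum(min(n, c2.get(v, 0)) for v, n in c1.items())
  (c1.items.map (fun p => min p.2 (c2.getD p.1 0))).sum

-- ===== PRECONDITION & SPEC =====
def Spec_num_matches (list1 : List Int) (list2 : List Int) (out : Int) : Prop := out = num_matches_alt list1 list2
instance (list1 : List Int) (list2 : List Int) (out : Int) : Decidable (Spec_num_matches list1 list2 out) := by unfold Spec_num_matches; infer_instance

-- ===== CLAIM (what is proved, stated in full; the proofs are below) =====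
def Claim_equal_num_matches : Prop := ∀ (list1 : List Int) (list2 : List Int), Dom_num_matches list1 list2 → Spec_num_matches list1 list2 (num_matches list1 list2)

-- ===== LEMMAS AND PROOFS =====

-- structural form of A's merge loop
def pvMergeCount : List Int → List Int → Int
  | a :: t1, b :: t2 =>
    if a = b then 1 + pvMergeCount t1 t2
    else if a < b then pvMergeCount t1 (b :: t2)
    else pvMergeCount (a :: t1) t2
  | _, _ => 0
termination_by l1 l2 => l1.length + l2.length

lemma pvALoop_eq (l1 l2 : List Int) : ∀ i j m,
    pvALoop l1 l2 i j m = m + pvMergeCount (l1.drop i) (l2.drop j) := by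
  intro i j m
  fun_induction pvALoop l1 l2 i j m with
  | case1 i j m h heq ih =>
    rw [ih, List.drop_eq_getElem_cons h.1, List.drop_eq_getElem_cons h.2,
      pvMergeCount, if_pos heq]
    ring
  | case2 i j m h hne hlt ih =>
    rw [ih, List.drop_eq_getElem_cons h.1, List.drop_eq_getElem_cons h.2,
      pvMergeCount, if_neg hne, if_pos hlt, ← List.drop_eq_getElem_cons h.2]
  | case3 i j m h hne hnlt ih =>
    rw [ih, List.drop_eq_getElem_cons h.1, List.drop_eq_getElem_cons h.2,
      pvMergeCount, if_neg hne, if_neg hnlt, ← List.drop_eq_getElem_cons h.1]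
  | case4 i j m h =>
    have hnil : l1.drop i = [] ∨ l2.drop j = [] := by
      rcases not_and_or.mp h with h' | h'
      · exact Or.inl (List.drop_eq_nil_of_le (by omega))
      · exact Or.inr (List.drop_eq_nil_of_le (by omega))
    rcases hnil with h' | h'
    · rw [h']; cases l2.drop j <;> simp [pvMergeCount]
    · rw [h']; cases l1.drop i <;> simp [pvMergeCount]

lemma pvMergeCount_eq (l1 l2 : List Int)
    (h1 : l1.Pairwise (· ≤ ·)) (h2 : l2.Pairwise (· ≤ ·)) :
    pvMergeCount l1 l2 = (((l1 : Multiset Int) ∩ (l2 : Multiset Int)).card : Int) := by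
  revert h1 h2
  fun_induction pvMergeCount l1 l2 with
  | case1 t1 a t2 ih =>
    intro h1 h2
    have key : (↑(a :: t1) : Multiset Int) ∩ ↑(a :: t2) = a ::ₘ ((↑t1 : Multiset Int) ∩ ↑t2) := by
      ext v
      simp only [← Multiset.cons_coe, Multiset.count_inter, Multiset.count_cons]
      split_ifs <;> omega
    rw [key, Multiset.card_cons, ih (List.Pairwise.of_cons h1) (List.Pairwise.of_cons h2)]
    push_cast; ring
  | case2 a t1 b t2 hne hlt ih =>
    intro h1 h2
    have h0 : Multiset.count a (↑t2 : Multiset Int) = 0 := by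
      rw [Multiset.count_eq_zero]
      intro hm
      exact absurd hlt (not_lt.mpr (List.rel_of_pairwise_cons h2 (by simpa using hm)))
    have key : (↑(a :: t1) : Multiset Int) ∩ ↑(b :: t2) = (↑t1 : Multiset Int) ∩ ↑(b :: t2) := by
      ext v
      simp only [← Multiset.cons_coe, Multiset.count_inter, Multiset.count_cons]
      by_cases hv : v = a
      · subst hv; simp [hne, h0]
      · simp [hv]
    rw [key, ih (List.Pairwise.of_cons h1) h2]
  | case3 a t1 b t2 hne hnlt ih =>
    intro h1 h2
    have h0 : Multiset.count b (↑t1 : Multiset Int) = 0 := by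
      rw [Multiset.count_eq_zero]
      intro hm
      have hbl : b < a := lt_of_le_of_ne (not_lt.mp hnlt) (fun h => hne h.symm)
      exact absurd hbl (not_lt.mpr (List.rel_of_pairwise_cons h1 (by simpa using hm)))
    have key : (↑(a :: t1) : Multiset Int) ∩ ↑(b :: t2) = (↑(a :: t1) : Multiset Int) ∩ ↑t2 := by
      ext v
      simp only [← Multiset.cons_coe, Multiset.count_inter, Multiset.count_cons]
      by_cases hv : v = b
      · subst hv; simp [h0, Ne.symm hne]
      · simp [hv]
    rw [key, ih h1 (List.Pairwise.of_cons h2)]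
  | case4 x y h =>
    intro h1 h2
    match x, y with
    | [], y => simp
    | a :: t1, [] => simp
    | a :: t1, b :: t2 => exact (h a t1 b t2 rfl rfl).elim

lemma pv_card_inter_eq_sum (l1 l2 : List Int) :
    (((l1 : Multiset Int) ∩ (l2 : Multiset Int)).card : Int)
      = ∑ v ∈ l1.toFinset, min ((l1.count v : Int)) ((l2.count v : Int)) := by
  have h1 : ((l1 : Multiset Int) ∩ (l2 : Multiset Int)).card
      = ∑ v ∈ l1.toFinset, min (l1.count v) (l2.count v) := by
    calc ((l1 : Multiset Int) ∩ (l2 : Multiset Int)).card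
        = ∑ v ∈ ((l1 : Multiset Int) ∩ l2).toFinset,
            ((l1 : Multiset Int) ∩ (l2 : Multiset Int)).count v :=
          (Multiset.toFinset_sum_count_eq _).symm
      _ = ∑ v ∈ ((l1 : Multiset Int) ∩ l2).toFinset, min (l1.count v) (l2.count v) := by
          refine Finset.sum_congr rfl ?_
          intro v _
          simp
      _ = ∑ v ∈ l1.toFinset, min (l1.count v) (l2.count v) := by
          refine Finset.sum_subset ?_ ?_
          · intro v hv
            rw [Multiset.mem_toFinset] at hv
            simpa [List.mem_toFinset] using Multiset.mem_of_le (Multiset.inter_le_left ..) hv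
          · intro v _ hv
            rw [Multiset.mem_toFinset, ← Multiset.count_pos, Multiset.count_inter] at hv
            simp only [Multiset.coe_count] at hv
            omega
  rw [h1, Nat.cast_sum]
  exact Finset.sum_congr rfl (fun v _ => by push_cast; rfl)

lemma pvAlt_eq (l1 l2 : List Int) :
    ((PySem.Dict.counter l1).items.map (fun p => min p.2 ((PySem.Dict.counter l2).getD p.1 0))).sum
      = ∑ v ∈ l1.toFinset, min ((l1.count v : Int)) ((l2.count v : Int)) := by
  rw [PySem.Dict.items_counter, List.map_map]
  have hts : (PySem.Set.ofList l1).toFinset = l1.toFinset := by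
    ext v; simp [PySem.Set.mem_ofList]
  rw [← hts, ← List.sum_toFinset _ (PySem.Set.nodup_ofList l1)]
  exact Finset.sum_congr rfl (fun v _ => by simp [PySem.Dict.getD_counter])

-- ===== VERDICT (by name: the statement is the Claim_ definition above) =====
theorem num_matches_spec : Claim_equal_num_matches := by
  intro list1 list2 _
  unfold Spec_num_matches num_matches num_matches_alt
  simp only []
  rw [pvALoop_eq, PySem.Dict.foldl_insert_getD_add_one_eq_counter,
    PySem.Dict.foldl_insert_getD_add_one_eq_counter, pvAlt_eq]
  simp only [List.drop_zero, zero_add]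
  rw [pvMergeCount_eq _ _ (PySem.List.sorted_pairwise list1 (fun x => x))
        (PySem.List.sorted_pairwise list2 (fun x => x)), pv_card_inter_eq_sum]
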